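-- pv_equiv track=rewrite | github.com/pmnyc/my_tools | small_coding_test/house_robber.py | queues
-- ===== SOURCE A (Python) =====
-- def queues(houses):
--     #smaple
--     res = []
--     # start = 0
--     n_houses = len(houses)
--     if n_houses ==0:
--         res = res
--     elif n_houses <=2:
--         res_sequences = map(lambda x: [x], houses)
--         res_sequences = filter(lambda x: x not in res, res_sequences)
--         for s in res_sequences:
--             res.append(s)
--     else:
--         for i, num in enumerate(houses):
--             if i +2 > n_houses -1:
--                 continue
--             else:
--                 res_sequences = queues(houses[i+2:])
--                 res_sequences = map(lambda x: [num]+x, res_sequences)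
--                 res_sequences = filter(lambda x: x not in res, res_sequences)
--                 for s in res_sequences:
--                     res.append(s)
--     return res
-- ===== SOURCE B (Python) =====
-- def queues(houses):
--     # Bottom-up DP over suffixes: tab[j] holds the result for houses[s+1+j:],
--     # filled right-to-left, so each suffix is computed exactly once.
--     n = len(houses)
--     tab = [[]]
--     for s in range(n - 1, -1, -1):
--         m = n - s
--         if m <= 2:
--             row = []
--             for x in houses[s:]:
--                 if [x] not in row:
--                     row.append([x])
--         else:
--             row = []
--             for i in range(m - 2):
--                 for x in tab[i + 1]:
--                     cand = [houses[s + i]] + x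
--                     if cand not in row:
--                         row.append(cand)
--         tab.insert(0, row)
--     return tab[0]
-- ===== Notes on version B (the rewrite author's own statement) =====
-- stated objective: alternative
-- what changed: Replaced the top-down recursion on suffixes (queues(houses[i+2:]) re-invoked at every call site) by a bottom-up dynamic-programming table over suffixes filled right-to-left; the per-level length<=2/length>=3 split and the list-membership dedup are kept, but the recomputation of suffix results is traded for table lookups (total work is still dominated by the exponential-size output and its dedup scans).
import Mathlib
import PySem

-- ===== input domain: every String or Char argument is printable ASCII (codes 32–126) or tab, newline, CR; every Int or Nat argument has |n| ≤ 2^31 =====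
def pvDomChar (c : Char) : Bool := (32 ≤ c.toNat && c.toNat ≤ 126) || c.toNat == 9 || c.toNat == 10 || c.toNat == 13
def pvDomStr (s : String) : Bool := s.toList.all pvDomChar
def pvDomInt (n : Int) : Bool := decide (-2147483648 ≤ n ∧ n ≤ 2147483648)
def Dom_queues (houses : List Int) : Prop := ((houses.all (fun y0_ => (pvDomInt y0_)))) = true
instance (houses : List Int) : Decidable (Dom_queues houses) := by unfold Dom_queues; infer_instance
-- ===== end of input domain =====

-- B replaces A's overlapping top-down recursion by a bottom-up suffix table (each suffix computed once).

-- ===== PORT A =====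
-- Transliteration of A: recursion over suffixes; the 'for i, num in enumerate' loop
-- with its 'continue' guard becomes the recursive helper queuesGo; the lazy
-- map/filter/append pipeline becomes a foldl that dedups against the growing res.
mutual
def queues (houses : List Int) : List (List Int) :=
  if houses.length = 0 then []
  else if houses.length ≤ 2 then
    houses.foldl (fun res x => if [x] ∈ res then res else res ++ [[x]]) []
  else queuesGo houses 0 houses []
termination_by (houses.length, houses.length + 1)
decreasing_by exact Prod.Lex.right _ (Nat.lt_succ_self _)

def queuesGo (houses : List Int) (i : Nat) (rest : List Int) (res : List (List Int)) :
    List (List Int) :=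
  match rest with
  | [] => res
  | num :: rest' =>
    if i + 2 > houses.length - 1 then queuesGo houses (i+1) rest' res
    else
      queuesGo houses (i+1) rest'
        (((queues (houses.drop (i+2))).map (fun x => num :: x)).foldl
          (fun r x => if x ∈ r then r else r ++ [x]) res)
termination_by (houses.length, rest.length)
decreasing_by
  · exact Prod.Lex.right _ (Nat.lt_succ_self _)
  · exact Prod.Lex.left _ _ (by simp [List.length_drop]; omega)
  · exact Prod.Lex.right _ (Nat.lt_succ_self _)
end

-- ===== PORT B =====
-- Transliteration of Source B: rowB is one iteration of the right-to-left loop,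
-- tabB builds the table (tab is kept as the list of rows for s+1, …, n).
def rowB (houses : List Int) (s : Nat) (tab : List (List (List Int))) : List (List Int) :=
  let m := houses.length - s
  if m ≤ 2 then
    (houses.drop s).foldl (fun row x => if [x] ∈ row then row else row ++ [[x]]) []
  else
    (List.range (m - 2)).foldl
      (fun row i =>
        (tab.getD (i+1) []).foldl
          (fun row x =>
            let cand := houses.getD (s+i) 0 :: x
            if cand ∈ row then row else row ++ [cand]) row) []

def tabB (houses : List Int) : Nat → List (List (List Int))
  | 0 => [[]]
  | k+1 => rowB houses (houses.length - (k+1)) (tabB houses k) :: tabB houses k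

def queues_alt (houses : List Int) : List (List Int) :=
  (tabB houses houses.length).headD []

-- ===== PRECONDITION & SPEC =====
def Spec_queues (houses : List Int) (out : List (List Int)) : Prop := out = queues_alt houses
instance (houses : List Int) (out : List (List Int)) : Decidable (Spec_queues houses out) := by unfold Spec_queues; infer_instance

-- ===== CLAIM (what is proved, stated in full; the proofs are below) =====
def Claim_equal_queues : Prop := ∀ (houses : List Int), Dom_queues houses → Spec_queues houses (queues houses)

-- ===== LEMMAS AND PROOFS =====

theorem queuesGo_eq (hs : List Int) :
    ∀ (rest : List Int) (i : Nat) (res : List (List Int)), rest = hs.drop i →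
    queuesGo hs i rest res =
      (List.range' i rest.length).foldl
        (fun r i' =>
          if i' + 2 > hs.length - 1 then r
          else ((queues (hs.drop (i'+2))).map (fun x => hs.getD i' 0 :: x)).foldl
            (fun r x => if x ∈ r then r else r ++ [x]) r) res := by
  intro rest
  induction rest with
  | nil => intro i res _; simp [queuesGo]
  | cons num rest' ih =>
    intro i res hdrop
    have hget : hs.getD i 0 = num := by
      have h0 : (hs.drop i)[0]? = some num := by rw [← hdrop]; rfl
      rw [List.getElem?_drop] at h0
      simp only [Nat.add_zero] at h0
      simp [List.getD, h0]
    have hdrop' : rest' = hs.drop (i+1) := by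
      have := congrArg List.tail hdrop
      simpa [List.tail_drop] using this
    simp only [List.length_cons]
    rw [List.range'_succ]
    simp only [List.foldl_cons]
    by_cases hg : i + 2 > hs.length - 1
    · simp only [queuesGo, hg, if_pos, ih (i+1) res hdrop']
    · simp only [queuesGo, hg, if_false, hget, ih (i+1) _ hdrop']

theorem row_correct (houses : List Int) (s : Nat) (tab : List (List (List Int)))
    (hs_le : s ≤ houses.length)
    (htab : ∀ j, j < houses.length - s →
      tab.getD j [] = queues (houses.drop (s+1+j))) :
    rowB houses s tab = queues (houses.drop s) := by
  set m := houses.length - s with hm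
  have hlen : (houses.drop s).length = m := by simp [hm]
  by_cases h2 : m ≤ 2
  · -- short suffix: both are the same singleton fold
    rw [rowB]
    simp only [← hm, if_pos h2]
    rw [queues]
    rcases Nat.eq_zero_or_pos m with h0 | h0
    · have : houses.drop s = [] := by
        apply List.eq_nil_of_length_eq_zero; omega
      simp [this]
    · rw [if_neg (by omega), if_pos (by omega)]
  · -- long suffix
    rw [rowB]
    simp only [← hm, if_neg h2]
    rw [queues, if_neg (by omega), if_neg (by omega)]
    rw [queuesGo_eq (houses.drop s) (houses.drop s) 0 [] (by simp)]
    rw [hlen]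
    -- split range m into range (m-2) and the two skipped indices
    obtain ⟨t, ht⟩ : ∃ t, m = t + 2 := ⟨m-2, by omega⟩
    have ht2 : m - 2 = t := by omega
    have hsplit : List.range' 0 m = List.range' 0 t ++ List.range' t 2 := by
      rw [ht, ← List.range'_append]
      norm_num
    rw [hsplit, List.foldl_append]
    have hskip : ∀ (r : List (List Int)),
        (List.range' t 2).foldl
          (fun r i' =>
            if i' + 2 > m - 1 then r
            else ((queues ((houses.drop s).drop (i'+2))).map
              (fun x => (houses.drop s).getD i' 0 :: x)).foldl
              (fun r x => if x ∈ r then r else r ++ [x]) r) r = r := by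
      intro r
      have h1 : t + 2 > m - 1 := by omega
      have h2' : (t+1) + 2 > m - 1 := by omega
      rw [show List.range' t 2 = [t, t+1] from rfl]
      simp only [List.foldl_cons, List.foldl_nil, if_pos h1, if_pos h2']
    rw [hskip, ← List.range_eq_range', ht2]
    apply PySem.List.foldl_congr_mem
    intro r i hi
    have hilt : i < t := List.mem_range.mp hi
    rw [if_neg (by omega)]
    rw [htab (i+1) (by omega)]
    have hdd : (houses.drop s).drop (i+2) = houses.drop (s+1+(i+1)) := by
      rw [List.drop_drop]; congr 1; omega
    have hgd : (houses.drop s).getD i 0 = houses.getD (s+i) 0 := by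
      have hi' : i < (houses.drop s).length := by omega
      have hi'' : s + i < houses.length := by omega
      simp [List.getD, List.getElem?_drop, hi'']
    rw [hdd, hgd, List.foldl_map]

theorem tab_correct (houses : List Int) :
    ∀ k, k ≤ houses.length →
      tabB houses k =
        (List.range (k+1)).map (fun j => queues (houses.drop (houses.length - k + j))) := by
  intro k
  induction k with
  | zero =>
    intro _
    simp [tabB, List.range_one, queues]
  | succ k ih =>
    intro hk
    have ih' := ih (by omega)
    rw [tabB, ih']
    have hrow : rowB houses (houses.length - (k+1))
        ((List.range (k+1)).map (fun j => queues (houses.drop (houses.length - k + j)))) =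
        queues (houses.drop (houses.length - (k+1))) := by
      apply row_correct
      · omega
      · intro j hj
        have hj' : j < k + 1 := by omega
        rw [List.getD_eq_getElem?_getD, List.getElem?_map,
          List.getElem?_range hj']
        simp only [Option.map_some, Option.getD_some]
        congr 2
        omega
    have hr : List.range (k+1+1) = 0 :: (List.range (k+1)).map Nat.succ :=
      List.range_succ_eq_map
    rw [hrow, hr, List.map_cons, List.map_map]
    refine List.cons_eq_cons.mpr ⟨by simp, ?_⟩
    apply List.map_congr_left
    intro j hj
    simp only [Function.comp_apply, Nat.succ_eq_add_one]
    have he : houses.length - k + j = houses.length - (k+1) + (j+1) := by omega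
    rw [he]

-- ===== VERDICT (by name: the statement is the Claim_ definition above) =====
theorem queues_spec : Claim_equal_queues := by
  intro houses _
  unfold Spec_queues queues_alt
  rw [tab_correct houses houses.length le_rfl]
  have : (0:Nat) < houses.length + 1 := by omega
  rw [List.range_succ_eq_map]
  simp
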